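-- pv_equiv track=rewrite | github.com/kiung22/algorithm-problem-solving | Programmers/level3/level3_04.py | solution
-- ===== SOURCE A (Python) =====
-- def solution(a):
--     left = []
--     for i in a:
--         if not left or left[-1]>i:
--             left.append(i)
--         else:
--             left.append(left[-1])
--     right = []
--     for i in reversed(a):
--         if not right or right[-1]>i:
--             right.append(i)
--         else:
--             right.append(right[-1])
--     right.reverse()
--
--     answer = 0
--     for x, l, r in zip(a, left, right):
--         if x > l and x > r:
--             continue
--         answer += 1
--     return answer
-- ===== SOURCE B (Python) =====
-- def solution(a):
--     if not a:
--         return 0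
--
--     def records(xs):
--         m = None
--         c = 0
--         for x in xs:
--             if m is None or x <= m:
--                 c += 1
--                 m = x
--         return c
--
--     return records(a) + records(reversed(a)) - a.count(min(a))
-- ===== Notes on version B (the rewrite author's own statement) =====
-- stated objective: simpler
-- what changed: Replaces the prefix-min and suffix-min arrays plus a zip scan by inclusion-exclusion: count left-to-right record minima, plus right-to-left record minima, minus the occurrences of the global minimum, using only a running minimum (O(1) extra space, no intermediate lists).
import Mathlib
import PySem

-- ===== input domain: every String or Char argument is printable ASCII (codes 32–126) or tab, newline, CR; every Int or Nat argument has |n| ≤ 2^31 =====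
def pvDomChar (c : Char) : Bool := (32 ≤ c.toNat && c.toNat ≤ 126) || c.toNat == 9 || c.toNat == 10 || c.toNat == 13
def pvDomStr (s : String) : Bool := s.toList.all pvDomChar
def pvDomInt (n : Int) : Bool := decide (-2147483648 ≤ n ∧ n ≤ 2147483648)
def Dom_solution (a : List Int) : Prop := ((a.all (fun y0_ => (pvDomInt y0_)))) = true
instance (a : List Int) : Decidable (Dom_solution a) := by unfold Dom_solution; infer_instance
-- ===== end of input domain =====

-- B replaces A's prefix/suffix-min arrays + zip scan by inclusion-exclusion over record minima (simpler, O(1) extra space).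

-- ===== PORT A =====
-- 'left.append(...)' loop body: branch on 'not left or left[-1] > i'
def leftStep (acc : List Int) (i : Int) : List Int :=
  match acc.getLast? with
  | none => acc ++ [i]
  | some m => if m > i then acc ++ [i] else acc ++ [m]

def solution (a : List Int) : Int :=
  let left := a.foldl leftStep []
  let right := (a.reverse.foldl leftStep []).reverse
  (a.zip (left.zip right)).foldl
    (fun ans t => if t.1 > t.2.1 ∧ t.1 > t.2.2 then ans else ans + 1) 0

-- ===== PORT B =====
-- Source B's inner 'records' loop: m is the Optional running minimum, c the count
def records : Option Int → Int → List Int → Int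
  | _, c, [] => c
  | o, c, x :: t =>
    if (match o with | none => true | some m => decide (x ≤ m)) then records (some x) (c + 1) t
    else records o c t

def solution_alt (a : List Int) : Int :=
  if a = [] then 0
  else records none 0 a + records none 0 a.reverse -
    (match PySem.List.min? a (fun y => y) with
     | some m => (PySem.List.count a m : Int)
     | none => 0)

-- ===== PRECONDITION & SPEC =====
def Spec_solution (a : List Int) (out : Int) : Prop := out = solution_alt a
instance (a : List Int) (out : Int) : Decidable (Spec_solution a out) := by unfold Spec_solution; infer_instance

-- ===== CLAIM (what is proved, stated in full; the proofs are below) =====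
def Claim_equal_solution : Prop := ∀ (a : List Int), Dom_solution a → Spec_solution a (solution a)

-- ===== LEMMAS AND PROOFS =====

-- running minimum over Option Int ('none' = not started)
def omin : Option Int → Int → Option Int
  | none, x => some x
  | some m, x => some (min m x)

def oleB (x : Int) : Option Int → Bool
  | none => true
  | some m => decide (x ≤ m)

-- record-minima count (B's loop, no accumulator)
def rcO : Option Int → List Int → Nat
  | _, [] => 0
  | o, x :: t => if oleB x o then 1 + rcO (some x) t else rcO o t

-- A's per-index condition, folded into one recursion with running prefix min o
def cA : Option Int → List Int → Nat
  | _, [] => 0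
  | o, x :: t => (if oleB x o || oleB x (t.foldl omin none) then 1 else 0) + cA (omin o x) t

-- right-to-left record minima, counted structurally
def rr : List Int → Nat
  | [] => 0
  | x :: t => (if oleB x (t.foldl omin none) then 1 else 0) + rr t

-- both-sides count (the intersection)
def cB : Option Int → List Int → Nat
  | _, [] => 0
  | o, x :: t => (if oleB x o && oleB x (t.foldl omin none) then 1 else 0) + cB (omin o x) t

-- prefix-min list with optional seed (characterises A's 'left')
def pmo : Option Int → List Int → List Int
  | o, [] => []
  | o, x :: t =>
    (match o with | none => x | some m => if m > x then x else m) :: pmo (omin o x) t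

-- suffix-min list (characterises A's 'right')
def smLo : List Int → List Int
  | [] => []
  | x :: t => (match t.foldl omin none with | none => x | some m => min m x) :: smLo t

lemma pmo_head_val (o : Option Int) (x : Int) :
    (match o with | none => x | some m => if m > x then x else m) =
    (match o with | none => x | some m => min m x) := by
  cases o with
  | none => rfl
  | some m => simp only [min_def]; split_ifs <;> omega

lemma omin_val (o : Option Int) (x : Int) :
    omin o x = some (match o with | none => x | some m => min m x) := by
  cases o <;> rfl

lemma rcO_cons (o : Option Int) (x : Int) (t : List Int) :
    rcO o (x :: t) = (if oleB x o then 1 else 0) + rcO (omin o x) t := by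
  cases o with
  | none => simp [rcO, oleB, omin]
  | some m =>
    by_cases h : x ≤ m
    · simp [rcO, oleB, omin, h, min_eq_right h]
    · simp [rcO, oleB, omin, h, min_eq_left (by omega : m ≤ x)]

lemma omin_comm (o : Option Int) (x y : Int) :
    omin (omin o x) y = omin (omin o y) x := by
  cases o <;> simp [omin, min_comm, min_assoc, min_left_comm]

lemma ofold_omin_comm (t : List Int) (o : Option Int) (x : Int) :
    t.foldl omin (omin o x) = omin (t.foldl omin o) x := by
  induction t generalizing o with
  | nil => rfl
  | cons y t ih => simp only [List.foldl_cons, omin_comm o x y, ih]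

lemma ofold_reverse (t : List Int) (o : Option Int) :
    t.reverse.foldl omin o = t.foldl omin o := by
  induction t generalizing o with
  | nil => rfl
  | cons x t ih =>
      simp only [List.reverse_cons, List.foldl_append, List.foldl_cons, List.foldl_nil, ih,
        List.foldl_cons]
      rw [← ofold_omin_comm]

lemma rcO_append (u v : List Int) (o : Option Int) :
    rcO o (u ++ v) = rcO o u + rcO (u.foldl omin o) v := by
  induction u generalizing o with
  | nil => simp [rcO]
  | cons x u ih =>
      simp only [List.cons_append, rcO_cons, ih, List.foldl_cons]
      omega

lemma rr_eq_rcO_reverse (t : List Int) : rcO none t.reverse = rr t := by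
  induction t with
  | nil => rfl
  | cons x t ih =>
      simp only [List.reverse_cons, rcO_append, ih, ofold_reverse, rr]
      have : ∀ g : Option Int, rcO g [x] = if oleB x g then 1 else 0 := by
        intro g; simp [rcO]
      rw [this]; omega

lemma incl_excl (t : List Int) (o : Option Int) :
    cA o t + cB o t = rcO o t + rr t := by
  induction t generalizing o with
  | nil => rfl
  | cons x t ih =>
      simp only [cA, cB, rr, rcO_cons]
      have := ih (omin o x)
      cases hp : oleB x o <;> cases hq : oleB x (t.foldl omin none) <;> simp [hp, hq] <;> omega

lemma oleB_omin_self (g : Option Int) (x : Int) : oleB x (omin g x) = oleB x g := by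
  cases g with
  | none => simp [omin, oleB]
  | some m =>
    simp only [omin, oleB, decide_eq_decide]
    omega

lemma oleB_omin_split (y x : Int) (o g : Option Int) :
    (oleB y (omin o x) && oleB y g) = (oleB y o && oleB y (omin g x)) := by
  cases o <;> cases g <;> simp only [omin, oleB] <;> rw [Bool.eq_iff_iff] <;>
    simp only [Bool.and_eq_true, Bool.or_eq_true, decide_eq_true_eq, Bool.true_and, Bool.and_true, Bool.true_or, Bool.or_true, le_min_iff, min_le_iff, Bool.not_eq_eq_eq_not, Bool.not_true, Bool.not_and, Bool.not_or, Bool.not_eq_true', decide_eq_false_iff_not, beq_iff_eq, not_le, not_lt, iff_true, true_iff, and_true, true_and, or_true, true_or] <;> omega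

lemma cB_eq_countP (t : List Int) (o : Option Int) :
    cB o t = t.countP (fun y => oleB y o && oleB y (t.foldl omin none)) := by
  induction t generalizing o with
  | nil => rfl
  | cons x t ih =>
      simp only [cB, List.countP_cons, List.foldl_cons]
      have hfold : t.foldl omin (some x) = omin (t.foldl omin none) x := by
        have := ofold_omin_comm t none x
        simpa [omin] using this
      have h0 : omin none x = some x := rfl
      have hhead : (oleB x o && oleB x (t.foldl omin (omin none x))) =
          (oleB x o && oleB x (t.foldl omin none)) := by
        rw [h0, hfold, oleB_omin_self]
      have htail : (t.countP fun y => oleB y (omin o x) && oleB y (t.foldl omin none)) =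
          t.countP fun y => oleB y o && oleB y (t.foldl omin (omin none x)) := by
        apply List.countP_congr
        intro y _
        rw [h0, hfold, oleB_omin_split]
      rw [ih (omin o x), htail, hhead]
      omega

lemma fold_omin_some (t : List Int) (m : Int) :
    t.foldl omin (some m) = some (t.foldl min m) := by
  induction t generalizing m with
  | nil => rfl
  | cons x t ih => simp [omin, ih]

lemma cB_none_eq_count (x : Int) (t : List Int) :
    cB none (x :: t) = (x :: t).count (t.foldl min x) := by
  have hmin : PySem.List.min? (x :: t) (fun y => y) = some (t.foldl min x) :=
    PySem.List.min?_id_cons x t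
  have hle : ∀ y ∈ x :: t, t.foldl min x ≤ y := by
    intro y hy
    have := PySem.List.min?_isMin hmin
    simpa using this y hy
  rw [cB_eq_countP]
  have hfold : (x :: t).foldl omin none = some (t.foldl min x) := by
    simp only [List.foldl_cons, omin]
    exact fold_omin_some t x
  rw [hfold]
  rw [List.count_eq_countP]
  apply List.countP_congr
  intro y hy
  have := hle y hy
  simp only [oleB, Bool.true_and]
  rw [Bool.eq_iff_iff]
  simp only [Bool.and_eq_true, Bool.or_eq_true, decide_eq_true_eq, Bool.true_and, Bool.and_true, Bool.true_or, Bool.or_true, le_min_iff, min_le_iff, Bool.not_eq_eq_eq_not, Bool.not_true, Bool.not_and, Bool.not_or, Bool.not_eq_true', decide_eq_false_iff_not, beq_iff_eq, not_le, not_lt, iff_true, true_iff, and_true, true_and, or_true, true_or]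
  omega

-- A's 'left' list is pmo
lemma foldl_leftStep (t : List Int) (acc : List Int) :
    t.foldl leftStep acc = acc ++ pmo acc.getLast? t := by
  induction t generalizing acc with
  | nil => simp [pmo]
  | cons x t ih =>
      have hstep : leftStep acc x =
          acc ++ [(match acc.getLast? with | none => x | some m => if m > x then x else m)] := by
        unfold leftStep
        cases h : acc.getLast? with
        | none => simp [h]
        | some m => simp only [h]; split_ifs <;> rfl
      simp only [List.foldl_cons, hstep, ih, List.getLast?_concat]
      simp only [pmo, List.append_assoc, List.singleton_append]
      rw [omin_val, pmo_head_val]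

lemma pmo_append (u v : List Int) (o : Option Int) :
    pmo o (u ++ v) = pmo o u ++ pmo (u.foldl omin o) v := by
  induction u generalizing o with
  | nil => rfl
  | cons x u ih => simp [pmo, ih]

-- A's 'right' list is smLo
lemma pmo_reverse (t : List Int) :
    (pmo none t.reverse).reverse = smLo t := by
  induction t with
  | nil => rfl
  | cons x t ih =>
      simp only [List.reverse_cons, pmo_append, List.reverse_append, ih, ofold_reverse]
      have hpm : pmo (t.foldl omin none) [x] =
          [(match t.foldl omin none with | none => x | some m => min m x)] := by
        cases hg : t.foldl omin none with
        | none => rfl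
        | some m =>
            simp only [pmo, hg]
            congr 1
            simp only [min_def]; split_ifs <;> omega
      rw [hpm]
      rfl

-- the zip-scan over (a, left, right) equals cA
lemma zip_count_eq_cA (t : List Int) (o : Option Int) :
    (t.zip ((pmo o t).zip (smLo t))).countP
      (fun tr => !(decide (tr.1 > tr.2.1) && decide (tr.1 > tr.2.2))) = cA o t := by
  induction t generalizing o with
  | nil => rfl
  | cons x t ih =>
      simp only [pmo, smLo, List.zip_cons_cons, List.countP_cons, cA]
      rw [ih (omin o x)]
      have hhead :
          (!(decide (x > (match o with | none => x | some m => if m > x then x else m)) &&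
             decide (x > (match t.foldl omin none with | none => x | some m => min m x)))) =
          (oleB x o || oleB x (t.foldl omin none)) := by
        cases o <;> cases hg : t.foldl omin none <;>
          rw [Bool.eq_iff_iff] <;> simp [oleB, Bool.and_eq_true, Bool.or_eq_true, decide_eq_true_eq, Bool.true_and, Bool.and_true, Bool.true_or, Bool.or_true, le_min_iff, min_le_iff, Bool.not_eq_eq_eq_not, Bool.not_true, Bool.not_and, Bool.not_or, Bool.not_eq_true', decide_eq_false_iff_not, beq_iff_eq, not_le, not_lt, iff_true, true_iff, and_true, true_and, or_true, true_or] <;> omega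
      rw [hhead]
      omega

-- B's records loop vs rcO
lemma records_eq (t : List Int) (o : Option Int) (c : Int) :
    records o c t = c + (rcO o t : Int) := by
  induction t generalizing o c with
  | nil => simp [records, rcO]
  | cons x t ih =>
      cases o with
      | none => simp [records, rcO, oleB, ih]; omega
      | some m =>
          by_cases h : x ≤ m
          · simp [records, rcO, oleB, h, ih]; omega
          · simp [records, rcO, oleB, h, ih]

-- turn A's answer loop into a countP
lemma foldl_answer (l : List (Int × Int × Int)) :
    l.foldl (fun ans t => if t.1 > t.2.1 ∧ t.1 > t.2.2 then ans else ans + 1) 0 =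
    (l.countP (fun tr => !(decide (tr.1 > tr.2.1) && decide (tr.1 > tr.2.2))) : Int) := by
  have h : ∀ (l : List (Int × Int × Int)) (c : Int),
      l.foldl (fun ans t => if t.1 > t.2.1 ∧ t.1 > t.2.2 then ans else ans + 1) c =
      c + (l.countP (fun tr => !(decide (tr.1 > tr.2.1) && decide (tr.1 > tr.2.2))) : Int) := by
    intro l
    induction l with
    | nil => simp
    | cons x t ih =>
        intro c
        simp only [List.foldl_cons, List.countP_cons, ih]
        by_cases hx : x.1 > x.2.1 ∧ x.1 > x.2.2
        · simp [hx]
        · have : (!(decide (x.1 > x.2.1) && decide (x.1 > x.2.2))) = true := by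
            simp; omega
          simp only [if_neg hx, this, if_pos]
          push_cast
          omega
  simpa using h l 0

-- ===== VERDICT (by name: the statement is the Claim_ definition above) =====
theorem solution_spec : Claim_equal_solution := by
  intro a _
  unfold Spec_solution solution solution_alt
  cases a with
  | nil => rfl
  | cons x t =>
      simp only [List.cons_ne_self, if_neg (List.cons_ne_nil x t)]
      rw [foldl_leftStep, foldl_leftStep]
      simp only [List.nil_append, List.getLast?_nil]
      rw [pmo_reverse, foldl_answer, zip_count_eq_cA]
      rw [records_eq, records_eq]
      rw [PySem.List.min?_id_cons]
      have hcount : PySem.List.count (x :: t) (t.foldl min x) =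
          (x :: t).count (t.foldl min x) := PySem.List.count_eq _ _
      have hcB := cB_none_eq_count x t
      have hie := incl_excl (x :: t) none
      have hrr := rr_eq_rcO_reverse (x :: t)
      simp only [hcount, ← hcB, ← hrr]
      push_cast
      omega
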